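-- pv_equiv track=rewrite | github.com/miliar/Code_Jam_Webscraper | solutions_python/solutions_year15_round4_nr1/80.py | check
-- ===== SOURCE A (Python) =====
-- def check(arr, x, y):
--   poss = []
--   for i in range(x):
--     if arr[i][y] != '.':
--       poss.append('^')
--       break
--   for i in range(x+1,len(arr)):
--     if arr[i][y] != '.':
--       poss.append('v')
--       break
--   for j in range(y):
--     if arr[x][j] != '.':
--       poss.append('<')
--       break
--   for j in range(y+1, len(arr[0])):
--     if arr[x][j] != '.':
--       poss.append('>')
--       break
--   return poss
-- ===== SOURCE B (Python) =====
-- def check(arr, x, y):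
--     up = down = left = right = False
--     for i, row in enumerate(arr):
--         if row[y] != '.':
--             if i < x:
--                 up = True
--             elif i > x:
--                 down = True
--     for j, c in enumerate(arr[x]):
--         if c != '.':
--             if j < y:
--                 left = True
--             elif j > y:
--                 right = True
--     return [s for s, f in (('^', up), ('v', down), ('<', left), ('>', right)) if f]
-- ===== Notes on version B (the rewrite author's own statement) =====
-- stated objective: alternative
-- what changed: replaces A's four short-circuiting directional break-loops by one exhaustive flag-accumulating pass over all rows (for the column) and one over the whole row, building the output from the four flags at the end; no early exit and no per-direction scan
-- outside the precondition, e.g. on check(['..', '#'], 1, 1): A returns ['<'], B raises IndexError; on check(['#'], 5, 0): A returns ['^'], B raises IndexError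
import Mathlib
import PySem

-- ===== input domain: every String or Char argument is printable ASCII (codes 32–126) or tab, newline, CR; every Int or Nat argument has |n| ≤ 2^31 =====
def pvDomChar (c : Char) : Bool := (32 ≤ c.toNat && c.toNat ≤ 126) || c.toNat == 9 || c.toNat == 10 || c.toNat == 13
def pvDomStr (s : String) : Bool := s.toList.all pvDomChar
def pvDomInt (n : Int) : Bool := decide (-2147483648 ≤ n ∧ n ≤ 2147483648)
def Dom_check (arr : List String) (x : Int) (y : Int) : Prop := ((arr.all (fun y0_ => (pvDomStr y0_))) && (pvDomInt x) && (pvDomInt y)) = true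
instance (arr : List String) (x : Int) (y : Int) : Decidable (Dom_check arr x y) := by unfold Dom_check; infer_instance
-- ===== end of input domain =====

-- B replaces A's four short-circuiting directional break-loops by one exhaustive
-- flag-accumulating pass over all rows and one over the whole row; output built from flags.

-- ===== PORT A =====
-- the test `arr[i][j] != '.'` (Python double indexing)
def hit (arr : List String) (i j : Int) : Bool :=
  ((PySem.List.pyGet? arr i).bind (fun s => PySem.Str.pyGet? s j)) != some '.'

-- `for i in range(lo, hi): if g(i): break` — whether the loop broke (appended)
def loopBreak (g : Int → Bool) (lo hi : Int) : Bool :=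
  if h : lo < hi then (if g lo then true else loopBreak g (lo + 1) hi) else false
termination_by (hi - lo).toNat
decreasing_by omega

def check (arr : List String) (x : Int) (y : Int) : List String :=
  let poss1 := if loopBreak (fun i => hit arr i y) 0 x then ["^"] else []
  let poss2 := if loopBreak (fun i => hit arr i y) (x + 1) (arr.length : Int) then poss1 ++ ["v"] else poss1
  let poss3 := if loopBreak (fun j => hit arr x j) 0 y then poss2 ++ ["<"] else poss2
  let poss4 := if loopBreak (fun j => hit arr x j) (y + 1) (PySem.Str.len ((PySem.List.pyGet? arr 0).getD "")) then poss3 ++ [">"] else poss3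
  poss4

-- ===== PORT B =====
-- B: one pass over enumerate(arr) setting up/down, one pass over enumerate(arr[x])
-- setting left/right, then a comprehension over the four (symbol, flag) pairs.
def check_alt (arr : List String) (x : Int) (y : Int) : List String :=
  let v := (PySem.List.enumerate arr).foldl
      (fun (fl : Bool × Bool) p =>
        if (PySem.Str.pyGet? p.2 y != some '.') then
          if p.1 < x then (true, fl.2)
          else if x < p.1 then (fl.1, true) else fl
        else fl) (false, false)
  let row := PySem.List.pyGetD arr x ""
  let h := (PySem.List.enumerate row.toList).foldl
      (fun (fl : Bool × Bool) p =>
        if (p.2 != '.') then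
          if p.1 < y then (true, fl.2)
          else if y < p.1 then (fl.1, true) else fl
        else fl) (false, false)
  [("^", v.1), ("v", v.2), ("<", h.1), (">", h.2)].filterMap
    (fun p => if p.2 then some p.1 else none)

-- ===== PRECONDITION & SPEC =====
-- Pre_ excludes inputs on which A raises IndexError and ragged/out-of-range inputs on
-- which A returns a scan accidentally cut short before an out-of-range access: it admits
-- the inputs where x and y are Python-valid indices for every row they are applied to
-- (negative wraparound included) and row x is as wide as row 0, on which both programs
-- return and agree.
def Pre_check (arr : List String) (x : Int) (y : Int) : Prop :=
  -(arr.length : Int) ≤ x ∧ x < (arr.length : Int) ∧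
  (∀ s ∈ arr, -(s.toList.length : Int) ≤ y ∧ y < (s.toList.length : Int)) ∧
  (PySem.List.pyGetD arr x "").toList.length = (arr.headD "").toList.length
instance (arr : List String) (x : Int) (y : Int) : Decidable (Pre_check arr x y) := by
  unfold Pre_check; infer_instance

def pvWitness_check : List String × Int × Int := (["..#", ".#.", "..."], 1, 1)

def Spec_check (arr : List String) (x : Int) (y : Int) (out : List String) : Prop := out = check_alt arr x y
instance (arr : List String) (x : Int) (y : Int) (out : List String) : Decidable (Spec_check arr x y out) := by unfold Spec_check; infer_instance

-- ===== CLAIM (what is proved, stated in full; the proofs are below) =====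
def Claim_equal_check : Prop := ∀ (arr : List String) (x : Int) (y : Int), Dom_check arr x y → Pre_check arr x y → Spec_check arr x y (check arr x y)

-- ===== LEMMAS AND PROOFS =====

-- A's break-loop detects exactly an index in [lo, hi) satisfying g
theorem loopBreak_iff (g : Int → Bool) (lo hi : Int) :
    loopBreak g lo hi = true ↔ ∃ i, lo ≤ i ∧ i < hi ∧ g i = true := by
  generalize hn : (hi - lo).toNat = n
  induction n generalizing lo with
  | zero =>
    rw [loopBreak]
    have h : ¬ lo < hi := by omega
    simp only [dif_neg h, Bool.false_eq_true, false_iff]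
    rintro ⟨i, h1, h2, _⟩; omega
  | succ n ih =>
    rw [loopBreak]
    have h : lo < hi := by omega
    simp only [dif_pos h]
    by_cases hg : g lo
    · simp only [hg, if_true, true_iff]
      exact ⟨lo, le_refl _, h, hg⟩
    · simp only [hg, Bool.false_eq_true, if_false]
      rw [ih (lo + 1) (by omega)]
      constructor
      · rintro ⟨i, h1, h2, h3⟩; exact ⟨i, by omega, h2, h3⟩
      · rintro ⟨i, h1, h2, h3⟩
        refine ⟨i, ?_, h2, h3⟩
        rcases eq_or_lt_of_le h1 with rfl | hlt
        · simp [h3] at hg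
        · omega

-- B's flag-accumulating fold computes two existence tests over the list
theorem foldl_flags {β : Type} (l : List β) (c : β → Bool) (P Q : β → Prop)
    [DecidablePred P] [DecidablePred Q] (u d : Bool) :
    (l.foldl (fun (fl : Bool × Bool) p =>
        if c p then (if P p then (true, fl.2) else if Q p then (fl.1, true) else fl) else fl)
      (u, d))
    = (u || l.any (fun p => c p && decide (P p)), d || l.any (fun p => c p && !decide (P p) && decide (Q p))) := by
  induction l generalizing u d with
  | nil => simp
  | cons p l ih =>
    simp only [List.foldl_cons, List.any_cons]
    by_cases hc : c p
    · by_cases hP : P p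
      · rw [if_pos hc, if_pos hP, ih]
        simp [hc, hP]
      · by_cases hQ : Q p
        · rw [if_pos hc, if_neg hP, if_pos hQ, ih]
          simp [hc, hP, hQ]
        · rw [if_pos hc, if_neg hP, if_neg hQ, ih]
          simp [hc, hP, hQ]
    · rw [if_neg (by simp [hc]), ih]
      simp [hc]

-- membership form of any over enumerate, specialised to start 0
theorem any_enumerate_iff {α : Type} (xs : List α) (f : Int × α → Bool) :
    (PySem.List.enumerate xs).any f = true ↔
      ∃ (k : Nat), ∃ (h : k < xs.length), f ((k : Int), xs[k]) = true := by
  rw [List.any_eq_true]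
  constructor
  · rintro ⟨p, hp, hf⟩
    rw [PySem.List.mem_enumerate_iff] at hp
    obtain ⟨k, hk, rfl⟩ := hp
    exact ⟨k, hk, by simpa using hf⟩
  · rintro ⟨k, hk, hf⟩
    refine ⟨((k : Int), xs[k]), ?_, hf⟩
    rw [PySem.List.mem_enumerate_iff]
    exact ⟨k, hk, by simp⟩

-- Python's xs[i] on any in-range index (negative wraparound included)
theorem pyGet?_wrap {α : Type} (l : List α) (i : Int)
    (h1 : -(l.length : Int) ≤ i) (h2 : i < (l.length : Int)) :
    PySem.List.pyGet? l i = l[(if i < 0 then i + (l.length : Int) else i).toNat]? := by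
  by_cases hneg : i < 0
  · have hk1 : 0 < (-i).toNat := by omega
    have hk2 : (-i).toNat ≤ l.length := by omega
    have hi : i = -(((-i).toNat : Int)) := by omega
    rw [hi, PySem.List.pyGet?_neg_natCast _ _ hk1 hk2]
    simp only [if_pos (show -(((-i).toNat : Int)) < 0 by omega)]
    congr 1; omega
  · rw [if_neg hneg, PySem.List.pyGet?_eq_some_getElem l (by omega) h2,
      List.getElem?_eq_getElem (by omega)]

-- ===== VERDICT (by name: the statement is the Claim_ definition above) =====
theorem check_spec : Claim_equal_check := by
  intro arr x y _ hpre
  obtain ⟨hx1, hx2, hally, hWeq⟩ := hpre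
  unfold Spec_check check check_alt
  have hH0 : 0 < arr.length := by omega
  have hne : arr ≠ [] := by
    intro h; subst h; simp at hH0
  -- the actual index of row arr[x] and basic facts about it
  have hxn : (if x < 0 then x + (arr.length : Int) else x).toNat < arr.length := by
    split <;> omega
  have hxget : PySem.List.pyGet? arr x
      = some (arr[(if x < 0 then x + (arr.length : Int) else x).toNat]'hxn) := by
    rw [pyGet?_wrap arr x hx1 hx2, List.getElem?_eq_getElem hxn]
  have hrowD : PySem.List.pyGetD arr x ""
      = arr[(if x < 0 then x + (arr.length : Int) else x).toNat]'hxn := by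
    simp [PySem.List.pyGetD, hxget]
  have hrowmem : arr[(if x < 0 then x + (arr.length : Int) else x).toNat]'hxn ∈ arr :=
    List.getElem_mem _
  have hyrow := hally _ hrowmem
  have hrowW : (arr[(if x < 0 then x + (arr.length : Int) else x).toNat]'hxn).toList.length
      = (arr.headD "").toList.length := by rw [← hrowD]; exact hWeq
  have h0get : PySem.List.pyGet? arr 0 = some (arr.headD "") := by
    cases arr with
    | nil => exact absurd rfl hne
    | cons a l => simp [PySem.List.pyGet?, PySem.List.pyIdx?]
  have hlen0 : PySem.Str.len ((PySem.List.pyGet? arr 0).getD "") = ((arr.headD "").toList.length : Int) := by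
    rw [h0get]; simp [PySem.Str.len_eq]
  -- vertical cell test at a non-negative index
  have hhitV : ∀ (k : Nat) (hk : k < arr.length),
      hit arr (k : Int) y = (PySem.Str.pyGet? arr[k] y != some '.') := by
    intro k hk
    simp [hit, PySem.List.pyGet?_natCast, List.getElem?_eq_getElem hk]
  -- vertical cell test at a negative index (wraparound)
  have hhitVneg : ∀ (i : Int) (h1 : -(arr.length : Int) ≤ i) (h2 : i < 0),
      hit arr i y = (PySem.Str.pyGet? (arr[(i + (arr.length : Int)).toNat]'(by omega)) y != some '.') := by
    intro i h1 h2
    have := pyGet?_wrap arr i h1 (by omega)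
    rw [if_pos h2] at this
    simp [hit, this, List.getElem?_eq_getElem (show (i + (arr.length : Int)).toNat < arr.length by omega)]
  -- up
  have hup : ((PySem.List.enumerate arr).any
        (fun p => (PySem.Str.pyGet? p.2 y != some '.') && decide (p.1 < x)))
      = loopBreak (fun i => hit arr i y) 0 x := by
    rw [Bool.eq_iff_iff, any_enumerate_iff, loopBreak_iff]
    constructor
    · rintro ⟨k, hk, hf⟩
      simp only [Bool.and_eq_true, decide_eq_true_eq] at hf
      exact ⟨(k : Int), by omega, hf.2, by rw [hhitV k hk]; exact hf.1⟩
    · rintro ⟨i, h1, h2, h3⟩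
      have hklen : i.toNat < arr.length := by omega
      refine ⟨i.toNat, hklen, ?_⟩
      simp only [Bool.and_eq_true, decide_eq_true_eq]
      have hi : ((i.toNat : Nat) : Int) = i := by omega
      rw [← hi, hhitV i.toNat hklen] at h3
      exact ⟨h3, by omega⟩
  -- down
  have hdown : ((PySem.List.enumerate arr).any
        (fun p => (PySem.Str.pyGet? p.2 y != some '.') && !decide (p.1 < x) && decide (x < p.1)))
      = loopBreak (fun i => hit arr i y) (x + 1) (arr.length : Int) := by
    rw [Bool.eq_iff_iff, any_enumerate_iff, loopBreak_iff]
    constructor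
    · rintro ⟨k, hk, hf⟩
      simp only [Bool.and_eq_true, decide_eq_true_eq, Bool.not_eq_eq_eq_not, Bool.not_true,
        decide_eq_false_iff_not] at hf
      exact ⟨(k : Int), by omega, by omega, by rw [hhitV k hk]; exact hf.1.1⟩
    · rintro ⟨i, h1, h2, h3⟩
      by_cases hi0 : 0 ≤ i
      · have hklen : i.toNat < arr.length := by omega
        refine ⟨i.toNat, hklen, ?_⟩
        simp only [Bool.and_eq_true, decide_eq_true_eq, Bool.not_eq_eq_eq_not, Bool.not_true,
          decide_eq_false_iff_not]
        have hi : ((i.toNat : Nat) : Int) = i := by omega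
        rw [← hi, hhitV i.toNat hklen] at h3
        exact ⟨⟨h3, by omega⟩, by omega⟩
      · -- negative index: A's scan read row i + len by wraparound; x itself is negative here
        have hxneg : x < 0 := by omega
        have hklen : (i + (arr.length : Int)).toNat < arr.length := by omega
        rw [hhitVneg i (by omega) (by omega)] at h3
        refine ⟨(i + (arr.length : Int)).toNat, hklen, ?_⟩
        simp only [Bool.and_eq_true, decide_eq_true_eq, Bool.not_eq_eq_eq_not, Bool.not_true,
          decide_eq_false_iff_not]
        exact ⟨⟨h3, by omega⟩, by omega⟩
  -- horizontal cell test at a non-negative index into row arr[x]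
  have hchar : ∀ (j : Int) (hj0 : 0 ≤ j)
      (hjlt : j < ((arr[(if x < 0 then x + (arr.length : Int) else x).toNat]'hxn).toList.length : Int)),
      hit arr x j
        = ((arr[(if x < 0 then x + (arr.length : Int) else x).toNat]'hxn).toList[j.toNat]'(by omega) != '.') := by
    intro j hj0 hjlt
    have hjn : j.toNat < (arr[(if x < 0 then x + (arr.length : Int) else x).toNat]'hxn).toList.length := by omega
    have hget : PySem.List.pyGet? (arr[(if x < 0 then x + (arr.length : Int) else x).toNat]'hxn).toList j
        = some ((arr[(if x < 0 then x + (arr.length : Int) else x).toNat]'hxn).toList[j.toNat]'hjn) :=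
      PySem.List.pyGet?_eq_some_getElem _ hj0 (by omega)
    simp [hit, hxget, hget, bne]
  -- horizontal cell test at a negative index (wraparound)
  have hcharneg : ∀ (j : Int)
      (h1 : -((arr[(if x < 0 then x + (arr.length : Int) else x).toNat]'hxn).toList.length : Int) ≤ j)
      (h2 : j < 0),
      hit arr x j
        = ((arr[(if x < 0 then x + (arr.length : Int) else x).toNat]'hxn).toList[(j + ((arr[(if x < 0 then x + (arr.length : Int) else x).toNat]'hxn).toList.length : Int)).toNat]'(by omega) != '.') := by
    intro j h1 h2
    have hjn : (j + ((arr[(if x < 0 then x + (arr.length : Int) else x).toNat]'hxn).toList.length : Int)).toNat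
        < (arr[(if x < 0 then x + (arr.length : Int) else x).toNat]'hxn).toList.length := by omega
    have := pyGet?_wrap (arr[(if x < 0 then x + (arr.length : Int) else x).toNat]'hxn).toList j h1 (by omega)
    rw [if_pos h2, List.getElem?_eq_getElem hjn] at this
    simp [hit, hxget, this, bne]
  -- left
  have hleft : ((PySem.List.enumerate (PySem.List.pyGetD arr x "").toList).any
        (fun p => (p.2 != '.') && decide (p.1 < y)))
      = loopBreak (fun j => hit arr x j) 0 y := by
    rw [Bool.eq_iff_iff, any_enumerate_iff, loopBreak_iff]
    constructor
    · rintro ⟨k, hk, hf⟩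
      simp only [Bool.and_eq_true, decide_eq_true_eq] at hf
      rw [hrowD] at hk
      refine ⟨(k : Int), by omega, hf.2, ?_⟩
      rw [hchar _ (by omega) (by omega)]
      simpa [hrowD] using hf.1
    · rintro ⟨j, h1, h2, h3⟩
      have hyrow' := hyrow
      have hjn : j.toNat < (PySem.List.pyGetD arr x "").toList.length := by
        rw [hrowD]; omega
      refine ⟨j.toNat, hjn, ?_⟩
      simp only [Bool.and_eq_true, decide_eq_true_eq]
      rw [hchar _ h1 (by omega)] at h3
      refine ⟨?_, by omega⟩
      simpa [hrowD] using h3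
  -- right
  have hright : ((PySem.List.enumerate (PySem.List.pyGetD arr x "").toList).any
        (fun p => (p.2 != '.') && !decide (p.1 < y) && decide (y < p.1)))
      = loopBreak (fun j => hit arr x j) (y + 1) (((arr.headD "").toList.length : Int)) := by
    rw [Bool.eq_iff_iff, any_enumerate_iff, loopBreak_iff]
    constructor
    · rintro ⟨k, hk, hf⟩
      simp only [Bool.and_eq_true, decide_eq_true_eq, Bool.not_eq_eq_eq_not, Bool.not_true,
        decide_eq_false_iff_not] at hf
      rw [hrowD] at hk
      refine ⟨(k : Int), by omega, by omega, ?_⟩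
      rw [hchar _ (by omega) (by omega)]
      simpa [hrowD] using hf.1.1
    · rintro ⟨j, h1, h2, h3⟩
      by_cases hj0 : 0 ≤ j
      · have hjn : j.toNat < (PySem.List.pyGetD arr x "").toList.length := by
          rw [hrowD]; omega
        refine ⟨j.toNat, hjn, ?_⟩
        simp only [Bool.and_eq_true, decide_eq_true_eq, Bool.not_eq_eq_eq_not, Bool.not_true,
          decide_eq_false_iff_not]
        rw [hchar _ hj0 (by omega)] at h3
        refine ⟨⟨?_, by omega⟩, by omega⟩
        simpa [hrowD] using h3
      · -- negative index: A read the char at j + row-length by wraparound; y is negative here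
        have hyneg : y < 0 := by omega
        rw [hcharneg j (by omega) (by omega)] at h3
        have hjn : (j + ((arr[(if x < 0 then x + (arr.length : Int) else x).toNat]'hxn).toList.length : Int)).toNat
            < (PySem.List.pyGetD arr x "").toList.length := by
          rw [hrowD]; omega
        refine ⟨_, hjn, ?_⟩
        simp only [Bool.and_eq_true, decide_eq_true_eq, Bool.not_eq_eq_eq_not, Bool.not_true,
          decide_eq_false_iff_not]
        refine ⟨⟨?_, by omega⟩, by omega⟩
        simpa [hrowD] using h3
  simp only [foldl_flags]
  simp only [Bool.false_or, hup, hdown, hleft, hlen0, hright]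
  generalize loopBreak (fun i => hit arr i y) 0 x = b1
  generalize loopBreak (fun i => hit arr i y) (x + 1) (arr.length : Int) = b2
  generalize loopBreak (fun j => hit arr x j) 0 y = b3
  generalize loopBreak (fun j => hit arr x j) (y + 1) (((arr.headD "").toList.length : Int)) = b4
  cases b1 <;> cases b2 <;> cases b3 <;> cases b4 <;> rfl
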